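-- pv_equiv track=rewrite | github.com/Jasperb3/FinanGPT | query.py | find_main_select_index
-- ===== SOURCE A (Python) =====
-- def find_main_select_index(sql: str) -> int:
--     lower = sql.lower()
--     idx = 0
--     depth = 0
--     in_single = False
--     in_double = False
--     while idx < len(sql):
--         char = sql[idx]
--         if char == "'" and not in_double:
--             if idx == 0 or sql[idx - 1] != "\\":
--                 in_single = not in_single
--         elif char == '"' and not in_single:
--             if idx == 0 or sql[idx - 1] != "\\":
--                 in_double = not in_double
--         if in_single or in_double:
--             idx += 1
--             continue
--         if char == "(":
--             depth += 1
--         elif char == ")":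
--             depth = max(0, depth - 1)
--         elif is_token_match(lower, idx, "select") and depth == 0:
--             return idx
--         idx += 1
--     return -1
--
-- def is_token_match(lower_sql: str, idx: int, token: str) -> bool:
--     token_len = len(token)
--     if lower_sql.startswith(token, idx):
--         before = lower_sql[idx - 1] if idx > 0 else " "
--         after_idx = idx + token_len
--         after = lower_sql[after_idx] if after_idx < len(lower_sql) else " "
--         return not before.isalnum() and before != "_" and not after.isalnum() and after != "_"
--     return False
-- ===== SOURCE B (Python) =====
-- def find_main_select_index(sql: str) -> int:
--     lower = sql.lower()
--     start = 0
--     while True: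
--         idx = lower.find("select", start)
--         if idx == -1:
--             return -1
--         if _boundary_ok(lower, idx) and _prefix_state(sql, idx) == (False, False, 0):
--             return idx
--         start = idx + 1
--
-- def _boundary_ok(lower, idx):
--     before = lower[idx - 1] if idx > 0 else " "
--     after = lower[idx + 6] if idx + 6 < len(lower) else " "
--     return not before.isalnum() and before != "_" and not after.isalnum() and after != "_"
--
-- def _prefix_state(sql, idx):
--     in_single = in_double = False
--     depth = 0
--     for i in range(idx):
--         char = sql[i]
--         if char == "'" and not in_double:
--             if i == 0 or sql[i - 1] != "\\":
--                 in_single = not in_single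
--         elif char == '"' and not in_single:
--             if i == 0 or sql[i - 1] != "\\":
--                 in_double = not in_double
--         if in_single or in_double:
--             continue
--         if char == "(":
--             depth += 1
--         elif char == ")":
--             depth = max(0, depth - 1)
--     return in_single, in_double, depth
-- ===== Notes on version B (the rewrite author's own statement) =====
-- stated objective: alternative
-- what changed: B is candidate-driven instead of a character-by-character state machine: it uses str.find to jump to each occurrence of 'select', then verifies only that candidate with the word-boundary test and a fresh prefix scan computing the quote-state and paren depth up to it; A's single fused scan disappears.
import Mathlib
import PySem

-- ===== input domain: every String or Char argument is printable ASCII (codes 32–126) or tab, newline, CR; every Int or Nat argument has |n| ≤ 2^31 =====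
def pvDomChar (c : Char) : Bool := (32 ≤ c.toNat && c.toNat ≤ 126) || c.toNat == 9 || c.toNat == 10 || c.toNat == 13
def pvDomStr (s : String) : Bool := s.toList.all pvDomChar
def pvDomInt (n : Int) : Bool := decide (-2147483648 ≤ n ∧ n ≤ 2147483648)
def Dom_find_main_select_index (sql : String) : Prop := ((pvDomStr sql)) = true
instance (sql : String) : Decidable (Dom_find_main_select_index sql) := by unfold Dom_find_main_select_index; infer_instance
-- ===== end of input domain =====

-- B is candidate-driven instead of a fused state machine: str.find jumps to each occurrence of
-- "select" and only that candidate is verified (word boundary + a fresh prefix scan of quote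
-- state and paren depth); alternative decomposition, same return value.

-- ===== PORT A =====
-- is_token_match, literal
def is_token_match (lower_sql : List Char) (idx : Nat) (token : List Char) : Bool :=
  let token_len := token.length
  if PySem.Chars.startswith (lower_sql.drop idx) token then
    let before := if idx > 0 then lower_sql.getD (idx - 1) ' ' else ' '
    let after_idx := idx + token_len
    let after := if after_idx < lower_sql.length then lower_sql.getD after_idx ' ' else ' '
    !(PySem.Chars.isalnum before) && before ≠ '_' && !(PySem.Chars.isalnum after) && after ≠ '_'
  else false

-- the while-loop of A: state (idx, depth, in_single, in_double)
def loopA (cs lower : List Char) (idx : Nat) (depth : Int)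
    (in_single in_double : Bool) : Int :=
  if _h : idx < cs.length then
    let char := cs.getD idx ' '
    let in_single' :=
      if char = '\'' ∧ in_double = false ∧ (idx = 0 ∨ cs.getD (idx - 1) ' ' ≠ '\\')
      then !in_single else in_single
    let in_double' :=
      if char = '"' ∧ in_single = false ∧ (idx = 0 ∨ cs.getD (idx - 1) ' ' ≠ '\\')
      then !in_double else in_double
    if in_single' || in_double' then
      loopA cs lower (idx + 1) depth in_single' in_double'
    else if char = '(' then
      loopA cs lower (idx + 1) (depth + 1) in_single' in_double'
    else if char = ')' then
      loopA cs lower (idx + 1) (max 0 (depth - 1)) in_single' in_double'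
    else if is_token_match lower idx "select".toList ∧ depth = 0 then
      (idx : Int)
    else
      loopA cs lower (idx + 1) depth in_single' in_double'
  else -1
termination_by cs.length - idx
decreasing_by all_goals exact Nat.sub_succ_lt_self _ _ _h

def find_main_select_index (sql : String) : Int :=
  let lower := (PySem.Str.lower sql).toList
  loopA sql.toList lower 0 0 false false

-- ===== PORT B =====
-- _boundary_ok, literal
def boundary_ok (lower : List Char) (idx : Nat) : Bool :=
  let before := if idx > 0 then lower.getD (idx - 1) ' ' else ' '
  let after := if idx + 6 < lower.length then lower.getD (idx + 6) ' ' else ' '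
  !(PySem.Chars.isalnum before) && before ≠ '_' && !(PySem.Chars.isalnum after) && after ≠ '_'

-- one iteration of _prefix_state's for-loop
def stateStep (cs : List Char) (st : Bool × Bool × Int) (i : Nat) : Bool × Bool × Int :=
  let char := cs.getD i ' '
  let in_s' :=
    if char = '\'' ∧ st.2.1 = false ∧ (i = 0 ∨ cs.getD (i - 1) ' ' ≠ '\\')
    then !st.1 else st.1
  let in_d' :=
    if char = '"' ∧ st.1 = false ∧ (i = 0 ∨ cs.getD (i - 1) ' ' ≠ '\\')
    then !st.2.1 else st.2.1
  if in_s' || in_d' then (in_s', in_d', st.2.2)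
  else if char = '(' then (in_s', in_d', st.2.2 + 1)
  else if char = ')' then (in_s', in_d', max 0 (st.2.2 - 1))
  else (in_s', in_d', st.2.2)

-- _prefix_state: for i in range(idx) as a fold
def prefix_state (cs : List Char) (idx : Nat) : Bool × Bool × Int :=
  (List.range idx).foldl (stateStep cs) (false, false, 0)

-- hand port of lower.find("select", start) for this nonempty needle: first i ≥ start where
-- the needle is a prefix of lower[i:], else -1 (exact for a nonempty needle and 0 ≤ start)
def findSel (lower : List Char) (start : Nat) : Int :=
  if _h : start < lower.length then
    if PySem.Chars.startswith (lower.drop start) "select".toList then (start : Int)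
    else findSel lower (start + 1)
  else -1
termination_by lower.length - start
decreasing_by exact Nat.sub_succ_lt_self _ _ _h

-- B's while-True loop over candidates; the fuel argument only makes the same computation
-- total (it is always sufficient: each found candidate lies ≥ start, see bLoop_eq below)
def bLoopF (cs lower : List Char) : Nat → Nat → Int
  | 0, _ => -1
  | fuel + 1, start =>
    let idx := findSel lower start
    if idx = -1 then -1
    else if boundary_ok lower idx.toNat ∧ prefix_state cs idx.toNat = (false, false, 0) then idx
    else bLoopF cs lower fuel (idx.toNat + 1)

def bLoop (cs lower : List Char) (start : Nat) : Int :=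
  bLoopF cs lower (lower.length + 1 - start) start

def find_main_select_index_alt (sql : String) : Int :=
  let cs := sql.toList
  let lower := (PySem.Str.lower sql).toList
  bLoop cs lower 0

-- ===== PRECONDITION & SPEC =====
def Spec_find_main_select_index (sql : String) (out : Int) : Prop := out = find_main_select_index_alt sql
instance (sql : String) (out : Int) : Decidable (Spec_find_main_select_index sql out) := by unfold Spec_find_main_select_index; infer_instance

-- ===== CLAIM =====
def Claim_equal_find_main_select_index : Prop := ∀ (sql : String), Dom_find_main_select_index sql → Spec_find_main_select_index sql (find_main_select_index sql)

-- ===== LEMMAS AND PROOFS =====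

-- a found candidate lies between start and the end of the string
theorem findSel_bounds (lower : List Char) : ∀ k start, lower.length - start = k →
    findSel lower start = -1 ∨
      (start ≤ (findSel lower start).toNat ∧ (findSel lower start).toNat < lower.length) := by
  intro k
  induction k with
  | zero =>
    intro start hk
    have h : ¬ start < lower.length := by omega
    left; rw [findSel, dif_neg h]
  | succ k ih =>
    intro start hk
    have h : start < lower.length := by omega
    rw [findSel, dif_pos h]
    by_cases hsw : PySem.Chars.startswith (lower.drop start) "select".toList = true
    · rw [if_pos hsw]; right; simp [h]
    · rw [if_neg hsw]
      rcases ih (start + 1) (by omega) with h1 | h1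
      · left; exact h1
      · right; exact ⟨by omega, h1.2⟩

-- any sufficient fuel computes the same value
theorem bLoopF_mono (cs lower : List Char) : ∀ f f' start,
    lower.length - start < f → lower.length - start < f' →
    bLoopF cs lower f start = bLoopF cs lower f' start := by
  intro f
  induction f with
  | zero => intro f' start h _; exact absurd h (Nat.not_lt_zero _)
  | succ f ih =>
    intro f' start h h'
    cases f' with
    | zero => exact absurd h' (Nat.not_lt_zero _)
    | succ f' =>
      simp only [bLoopF]
      by_cases h1 : findSel lower start = -1
      · rw [if_pos h1, if_pos h1]
      · rw [if_neg h1, if_neg h1]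
        rcases findSel_bounds lower (lower.length - start) start rfl with hb | hb
        · exact absurd hb h1
        · by_cases h2 : boundary_ok lower (findSel lower start).toNat = true ∧
              prefix_state cs (findSel lower start).toNat = (false, false, 0)
          · rw [if_pos h2, if_pos h2]
          · rw [if_neg h2, if_neg h2]
            exact ih f' ((findSel lower start).toNat + 1) (by omega) (by omega)

-- the unfolding equation of B's candidate loop
theorem bLoop_eq (cs lower : List Char) (start : Nat) :
    bLoop cs lower start =
      if findSel lower start = -1 then -1
      else if boundary_ok lower (findSel lower start).toNat = true ∧
          prefix_state cs (findSel lower start).toNat = (false, false, 0) then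
        findSel lower start
      else bLoop cs lower ((findSel lower start).toNat + 1) := by
  unfold bLoop
  cases hf : lower.length + 1 - start with
  | zero =>
    have h : ¬ start < lower.length := by omega
    have h1 : findSel lower start = -1 := by rw [findSel, dif_neg h]
    simp [bLoopF, h1]
  | succ f =>
    simp only [bLoopF]
    by_cases h1 : findSel lower start = -1
    · rw [if_pos h1, if_pos h1]
    · rw [if_neg h1, if_neg h1]
      rcases findSel_bounds lower (lower.length - start) start rfl with hb | hb
      · exact absurd hb h1
      · by_cases h2 : boundary_ok lower (findSel lower start).toNat = true ∧
            prefix_state cs (findSel lower start).toNat = (false, false, 0)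
        · rw [if_pos h2, if_pos h2]
        · rw [if_neg h2, if_neg h2]
          exact bLoopF_mono cs lower f (lower.length + 1 - ((findSel lower start).toNat + 1))
            ((findSel lower start).toNat + 1) (by omega) (by omega)

-- the token test splits into the prefix test and the boundary test
theorem is_token_match_eq (lower : List Char) (idx : Nat) :
    is_token_match lower idx "select".toList =
      (PySem.Chars.startswith (lower.drop idx) "select".toList && boundary_ok lower idx) := by
  unfold is_token_match boundary_ok
  cases h : PySem.Chars.startswith (lower.drop idx) "select".toList <;> simp [h]

-- unfold one trailing iteration of the prefix scan
theorem prefix_state_succ (cs : List Char) (idx : Nat) :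
    prefix_state cs (idx + 1) = stateStep cs (prefix_state cs idx) idx := by
  simp [prefix_state, List.range_succ, List.foldl_append]

-- a startswith-"select" position holds an 's'
theorem startswith_head (lower : List Char) (idx : Nat)
    (h : PySem.Chars.startswith (lower.drop idx) "select".toList = true) :
    lower.getD idx ' ' = 's' := by
  rw [PySem.Chars.startswith_iff] at h
  rcases h with ⟨t, ht⟩
  have h0 : lower[idx]? = some 's' := by
    have hdrop : (List.drop idx lower)[0]? = some 's' := by rw [← ht]; rfl
    simpa using hdrop
  simp [List.getD, h0]

-- getD through map, in range
theorem map_getD_lt (cs : List Char) (f : Char → Char) (idx : Nat) (h : idx < cs.length) :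
    (cs.map f).getD idx ' ' = f (cs.getD idx ' ') := by
  simp [List.getD, List.getElem?_eq_getElem h, List.getElem?_map]

-- a character whose lowercase is 's' is not a quote or parenthesis
theorem lc_s_not_special (c : Char) (h : PySem.Chars.lowerChar c = 's') :
    c ≠ '\'' ∧ c ≠ '"' ∧ c ≠ '(' ∧ c ≠ ')' := by
  refine ⟨?_, ?_, ?_, ?_⟩ <;> rintro rfl <;> revert h <;> decide

-- skip lemma: a position that B does not return from can be stepped over
theorem bLoop_skip (cs lower : List Char) (idx : Nat)
    (h : ¬ (PySem.Chars.startswith (lower.drop idx) "select".toList = true ∧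
            boundary_ok lower idx = true ∧ prefix_state cs idx = (false, false, 0))) :
    bLoop cs lower idx = bLoop cs lower (idx + 1) := by
  by_cases hlen : idx < lower.length
  · by_cases hsw : PySem.Chars.startswith (lower.drop idx) "select".toList = true
    · have hf : findSel lower idx = (idx : Int) := by rw [findSel, dif_pos hlen, if_pos hsw]
      rw [bLoop_eq cs lower idx, hf]
      have hne : ¬ ((idx : Int) = -1) := by omega
      rw [if_neg hne]
      have hcond : ¬ (boundary_ok lower (Int.toNat idx) = true ∧
          prefix_state cs (Int.toNat idx) = (false, false, 0)) := by
        simpa using fun hb hp => h ⟨hsw, hb, hp⟩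
      rw [if_neg hcond]
      simp
    · have hf : findSel lower idx = findSel lower (idx + 1) := by
        conv_lhs => rw [findSel]
        rw [dif_pos hlen, if_neg hsw]
      rw [bLoop_eq cs lower idx, bLoop_eq cs lower (idx + 1), hf]
  · have hf1 : findSel lower idx = -1 := by rw [findSel, dif_neg hlen]
    have hf2 : findSel lower (idx + 1) = -1 := by rw [findSel, dif_neg (by omega)]
    rw [bLoop_eq cs lower idx, bLoop_eq cs lower (idx + 1), hf1, hf2]

-- the heart: A's fused loop equals B's candidate loop, given the prefix-state invariant
theorem loopA_eq_bLoop (cs : List Char) :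
    ∀ k idx (s d : Bool) (depth : Int), cs.length - idx = k →
    prefix_state cs idx = (s, d, depth) →
    loopA cs (cs.map PySem.Chars.lowerChar) idx depth s d =
      bLoop cs (cs.map PySem.Chars.lowerChar) idx := by
  intro k
  induction k with
  | zero =>
    intro idx s d depth hk hinv
    have h : ¬ idx < cs.length := by omega
    have hL : ¬ idx < (cs.map PySem.Chars.lowerChar).length := by simpa using h
    have hf : findSel (cs.map PySem.Chars.lowerChar) idx = -1 := by
      rw [findSel, dif_neg hL]
    rw [loopA, dif_neg h, bLoop_eq, hf]
    simp
  | succ k ih =>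
    intro idx s d depth hk hinv
    have h : idx < cs.length := by omega
    have hL : idx < (cs.map PySem.Chars.lowerChar).length := by simpa using h
    have hlow : (cs.map PySem.Chars.lowerChar).getD idx ' ' =
        PySem.Chars.lowerChar (cs.getD idx ' ') := map_getD_lt cs _ idx h
    rw [loopA, dif_pos h]
    simp only []
    set char := cs.getD idx ' ' with hchar
    set s' := (if char = '\'' ∧ d = false ∧ (idx = 0 ∨ cs.getD (idx - 1) ' ' ≠ '\\')
               then !s else s) with hs'
    set d' := (if char = '"' ∧ s = false ∧ (idx = 0 ∨ cs.getD (idx - 1) ' ' ≠ '\\')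
               then !d else d) with hd'
    have hstep : prefix_state cs (idx + 1) =
        (if s' || d' then (s', d', depth)
         else if char = '(' then (s', d', depth + 1)
         else if char = ')' then (s', d', max 0 (depth - 1))
         else (s', d', depth)) := by
      rw [prefix_state_succ, hinv]; rfl
    have hsw_char : PySem.Chars.startswith ((cs.map PySem.Chars.lowerChar).drop idx)
        "select".toList = true → PySem.Chars.lowerChar char = 's' := by
      intro hsw
      have := startswith_head (cs.map PySem.Chars.lowerChar) idx hsw
      rw [hlow] at this; exact this
    cases hmask : (s' || d') with
    | true =>
      simp only [hmask, if_true]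
      have hskip : bLoop cs (cs.map PySem.Chars.lowerChar) idx =
          bLoop cs (cs.map PySem.Chars.lowerChar) (idx + 1) := by
        apply bLoop_skip
        rintro ⟨hsw, _, hp⟩
        have hns := lc_s_not_special char (hsw_char hsw)
        have hss : s' = s := by rw [hs', if_neg (fun hc => hns.1 hc.1)]
        have hdd : d' = d := by rw [hd', if_neg (fun hc => hns.2.1 hc.1)]
        rw [hinv] at hp
        have hps : s = false := congrArg (fun t => t.1) hp
        have hpd : d = false := congrArg (fun t => t.2.1) hp
        rw [hss, hdd, hps, hpd] at hmask
        simp at hmask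
      rw [hskip]
      exact ih (idx + 1) s' d' depth (by omega) (by rw [hstep, hmask]; rfl)
    | false =>
      simp only [hmask, Bool.false_eq_true, if_false]
      by_cases h1 : char = '('
      · rw [if_pos h1]
        have hskip : bLoop cs (cs.map PySem.Chars.lowerChar) idx =
            bLoop cs (cs.map PySem.Chars.lowerChar) (idx + 1) := by
          apply bLoop_skip
          rintro ⟨hsw, _, _⟩
          exact absurd (h1 ▸ hsw_char hsw) (by decide)
        rw [hskip]
        exact ih (idx + 1) s' d' (depth + 1) (by omega)
          (by rw [hstep, hmask]; simp [h1])
      · rw [if_neg h1]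
        by_cases h2 : char = ')'
        · rw [if_pos h2]
          have hskip : bLoop cs (cs.map PySem.Chars.lowerChar) idx =
              bLoop cs (cs.map PySem.Chars.lowerChar) (idx + 1) := by
            apply bLoop_skip
            rintro ⟨hsw, _, _⟩
            exact absurd (h2 ▸ hsw_char hsw) (by decide)
          rw [hskip]
          exact ih (idx + 1) s' d' (max 0 (depth - 1)) (by omega)
            (by rw [hstep, hmask]; simp [h1, h2])
        · rw [if_neg h2]
          by_cases h3 : is_token_match (cs.map PySem.Chars.lowerChar) idx "select".toList = true ∧ depth = 0
          · rw [if_pos h3]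
            obtain ⟨hitm, hdep⟩ := h3
            rw [is_token_match_eq] at hitm
            rw [Bool.and_eq_true] at hitm
            obtain ⟨hsw, hbd⟩ := hitm
            have hns := lc_s_not_special char (hsw_char hsw)
            have hss : s' = s := by rw [hs', if_neg (fun hc => hns.1 hc.1)]
            have hdd : d' = d := by rw [hd', if_neg (fun hc => hns.2.1 hc.1)]
            have hsd : s = false ∧ d = false := by
              rw [hss, hdd] at hmask
              constructor <;> [cases s; cases d] <;> simp_all
            have hpre : prefix_state cs idx = (false, false, 0) := by
              rw [hinv, hsd.1, hsd.2, hdep]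
            have hf : findSel (cs.map PySem.Chars.lowerChar) idx = (idx : Int) := by
              rw [findSel, dif_pos hL, if_pos hsw]
            rw [bLoop_eq, hf, if_neg (by omega : ¬ ((idx : Int) = -1))]
            rw [if_pos (by simpa using ⟨hbd, hpre⟩)]
          · rw [if_neg h3]
            have hskip : bLoop cs (cs.map PySem.Chars.lowerChar) idx =
                bLoop cs (cs.map PySem.Chars.lowerChar) (idx + 1) := by
              apply bLoop_skip
              rintro ⟨hsw, hbd, hpre⟩
              apply h3
              constructor
              · rw [is_token_match_eq, hsw, hbd]; rfl
              · rw [hinv] at hpre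
                exact congrArg (fun t => t.2.2) hpre
            rw [hskip]
            exact ih (idx + 1) s' d' depth (by omega)
              (by rw [hstep, hmask]; simp [h1, h2])

-- ===== VERDICT =====
theorem find_main_select_index_spec : Claim_equal_find_main_select_index := by
  intro sql _
  unfold Spec_find_main_select_index find_main_select_index find_main_select_index_alt
  simp only [PySem.Str.toList_lower, PySem.Chars.lower]
  exact loopA_eq_bLoop sql.toList _ 0 false false 0 rfl rfl
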